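-- pv_equiv track=rewrite | github.com/lugasyk/BasicsLearnig | genIntoIter.py | my_range3
-- ===== SOURCE A (Python) =====
-- from operator import gt,lt
--
-- def my_range3(start, stop=None, step=1):
--     if stop is None:
--         start, stop = 0, start
--     i = start
--     op = gt if start > stop else lt
--     while op(i, stop):
--         yield i
--         i += step
-- ===== SOURCE B (Python) =====
-- def my_range3(start, stop=None, step=1):
--     if stop is None:
--         start, stop = 0, start
--     diff = stop - start
--     if step != 0 and (diff > 0) == (step > 0):
--         n = -(-diff // step)  # ceiling division: number of yielded values
--     else:
--         n = 0
--     for k in range(n):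
--         yield start + k * step
-- ===== Notes on version B (the rewrite author's own statement) =====
-- stated objective: simpler
-- what changed: Replaces A's predicate-driven while loop (manual increment and gt/lt choice) by a closed-form ceiling-division count of the yielded values followed by a single range comprehension.
-- outside the precondition, e.g. on my_range3(0, 5, -1): A does not finish within the time limit, B returns []
import Mathlib
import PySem

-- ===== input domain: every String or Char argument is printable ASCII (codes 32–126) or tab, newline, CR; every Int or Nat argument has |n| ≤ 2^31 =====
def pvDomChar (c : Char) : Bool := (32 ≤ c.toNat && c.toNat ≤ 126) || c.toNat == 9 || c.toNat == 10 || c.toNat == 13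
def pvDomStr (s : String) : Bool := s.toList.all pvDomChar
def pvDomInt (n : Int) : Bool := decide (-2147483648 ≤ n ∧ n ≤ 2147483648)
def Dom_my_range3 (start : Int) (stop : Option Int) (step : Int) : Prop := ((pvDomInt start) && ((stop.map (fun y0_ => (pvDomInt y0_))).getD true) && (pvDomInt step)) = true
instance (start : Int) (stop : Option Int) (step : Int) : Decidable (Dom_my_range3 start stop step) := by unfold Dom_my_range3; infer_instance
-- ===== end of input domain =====

-- B replaces A's while-loop generator by a closed-form iteration count (ceiling division) and a single range map (objective: simpler).
-- Pre_ excludes the inputs on which A's while loop never terminates (step pointing away from stop, or step = 0 with start ≠ stop).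

-- ===== PORT A =====
-- A's while loop, fuel-bounded structural recursion; fuel 2^33 exceeds the ≤ 2^32 iterations possible on Dom ∩ Pre_.
def pvLoopA (t step : Int) (useGt : Bool) : Nat → Int → List Int
  | 0, _ => []
  | fuel+1, i => if (if useGt then t < i else i < t) then i :: pvLoopA t step useGt fuel (i + step) else []

def my_range3 (start : Int) (stop : Option Int) (step : Int) : List Int :=
  let p : Int × Int := match stop with | none => (0, start) | some v => (start, v)
  pvLoopA p.2 step (decide (p.1 > p.2)) 8589934592 p.1

-- ===== PORT B =====
def my_range3_alt (start : Int) (stop : Option Int) (step : Int) : List Int :=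
  let p : Int × Int := match stop with | none => (0, start) | some v => (start, v)
  let diff := p.2 - p.1
  let n : Int := if step ≠ 0 ∧ (decide (diff > 0) = decide (step > 0)) then -(PySem.Int.floordiv (-diff) step) else 0
  (PySem.List.pyRange 0 n 1).map (fun k => p.1 + k * step)

-- ===== PRECONDITION & SPEC =====
-- Pre_ excludes exactly the inputs on which A's while loop diverges (generator never exhausts): step pointing away from stop, or step = 0 while start ≠ stop.
def Pre_my_range3 (start : Int) (stop : Option Int) (step : Int) : Prop :=
  let p : Int × Int := match stop with | none => (0, start) | some v => (start, v)
  p.1 = p.2 ∨ (p.1 < p.2 ∧ 0 < step) ∨ (p.2 < p.1 ∧ step < 0)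
instance (start : Int) (stop : Option Int) (step : Int) : Decidable (Pre_my_range3 start stop step) := by unfold Pre_my_range3; infer_instance

def pvWitness_my_range3 : Int × Option Int × Int := (5, some 9, 2)

def Spec_my_range3 (start : Int) (stop : Option Int) (step : Int) (out : List Int) : Prop := out = my_range3_alt start stop step
instance (start : Int) (stop : Option Int) (step : Int) (out : List Int) : Decidable (Spec_my_range3 start stop step out) := by unfold Spec_my_range3; infer_instance

-- ===== CLAIM (what is proved, stated in full; the proofs are below) =====
def Claim_equal_my_range3 : Prop := ∀ (start : Int) (stop : Option Int) (step : Int), Dom_my_range3 start stop step → Pre_my_range3 start stop step → Spec_my_range3 start stop step (my_range3 start stop step)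

-- ===== LEMMAS AND PROOFS =====

-- Unfolding lemmas for one loop step, with the Bool test reduced.
theorem pvLoopA_succ_lt (t step : Int) (fuel : Nat) (i : Int) :
    pvLoopA t step false (fuel+1) i = if i < t then i :: pvLoopA t step false fuel (i + step) else [] := by
  simp [pvLoopA]

theorem pvLoopA_succ_gt (t step : Int) (fuel : Nat) (i : Int) :
    pvLoopA t step true (fuel+1) i = if t < i then i :: pvLoopA t step true fuel (i + step) else [] := by
  simp [pvLoopA]

-- The loop never runs when the condition fails, for any fuel.
theorem pvLoopA_stop (t step : Int) (b : Bool) (fuel : Nat) (i : Int)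
    (h : (if b = true then t < i else i < t) → False) : pvLoopA t step b fuel i = [] := by
  cases fuel with
  | zero => rfl
  | succ n =>
    cases b with
    | false => rw [pvLoopA_succ_lt, if_neg (by simpa using h)]
    | true => rw [pvLoopA_succ_gt, if_neg (by simpa using h)]

-- Ascending case: with positive step and enough fuel, the loop equals B's closed form.
theorem pvLoopA_lt (t step : Int) (hstep : 0 < step) :
    ∀ (fuel : Nat) (s : Int), t - s ≤ (fuel : Int) →
      pvLoopA t step false fuel s
        = (PySem.List.pyRange 0 (-(PySem.Int.floordiv (s - t) step)) 1).map (fun k => s + k * step) := by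
  intro fuel
  induction fuel with
  | zero =>
    intro s hf
    have h0 : (0:Int) ≤ PySem.Int.floordiv (s - t) step := by
      rw [PySem.Int.floordiv_eq_ediv_of_pos hstep]
      exact Int.ediv_nonneg (by omega) (by omega)
    rw [PySem.List.pyRange_one_eq_nil (by omega)]
    rfl
  | succ n ih =>
    intro s hf
    by_cases hst : s < t
    · have hiter : PySem.Int.floordiv (s + step - t) step = PySem.Int.floordiv (s - t) step + 1 := by
        rw [PySem.Int.floordiv_eq_ediv_of_pos hstep, PySem.Int.floordiv_eq_ediv_of_pos hstep]
        have := Int.add_mul_ediv_right (s - t) 1 (show step ≠ 0 by omega)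
        calc (s + step - t) / step = (s - t + 1 * step) / step := by ring_nf
          _ = (s - t) / step + 1 := this
      have hn' : PySem.Int.floordiv (s + step - t) step ≤ 0 := by
        rw [PySem.Int.floordiv_eq_ediv_of_pos hstep]
        have : (s + step - t) / step < 1 := by
          rw [Int.ediv_lt_iff_lt_mul hstep]; omega
        omega
      have hpos : 0 < -(PySem.Int.floordiv (s - t) step) := by omega
      rw [pvLoopA_succ_lt, if_pos hst]
      rw [ih (s + step) (by omega)]
      have harg : -(PySem.Int.floordiv (s + step - t) step) = -(PySem.Int.floordiv (s - t) step) - 1 := by omega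
      rw [harg]
      rw [PySem.List.pyRange_one_cons hpos]
      simp only [List.map_cons]
      congr 1
      · ring
      · rw [PySem.List.pyRange_one, PySem.List.pyRange_one]
        simp only [List.map_map]
        rw [show (-PySem.Int.floordiv (s - t) step - (0+1)) = (-PySem.Int.floordiv (s - t) step - 1 - 0) from by ring]
        apply List.map_congr_left
        intro k _
        simp only [Function.comp_apply]
        push_cast
        ring
    · have h0 : (0:Int) ≤ PySem.Int.floordiv (s - t) step := by
        rw [PySem.Int.floordiv_eq_ediv_of_pos hstep]
        exact Int.ediv_nonneg (by omega) (by omega)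
      rw [pvLoopA_stop t step false (n+1) s (by intro h; exact hst h)]
      rw [PySem.List.pyRange_one_eq_nil (by omega)]
      rfl

-- Descending loop is the negated ascending loop.
theorem pvLoopA_gt_neg (t step : Int) :
    ∀ (fuel : Nat) (s : Int),
      pvLoopA t step true fuel s = (pvLoopA (-t) (-step) false fuel (-s)).map (fun x => -x) := by
  intro fuel
  induction fuel with
  | zero => intro s; rfl
  | succ n ih =>
    intro s
    rw [pvLoopA_succ_gt, pvLoopA_succ_lt]
    by_cases h : t < s
    · rw [if_pos h, if_pos (show -s < -t by omega), List.map_cons, ih (s + step)]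
      simp only [neg_neg]
      rw [show (-s + -step) = -(s + step) from by ring]
    · rw [if_neg h, if_neg (show ¬ (-s < -t) by omega)]
      rfl

-- ===== VERDICT (by name: the statement is the Claim_ definition above) =====
theorem my_range3_spec : Claim_equal_my_range3 := by
  intro start stop step hdom hpre
  unfold Spec_my_range3 my_range3 my_range3_alt
  have hb : -2147483648 ≤ start ∧ start ≤ 2147483648 ∧
      -2147483648 ≤ step ∧ step ≤ 2147483648 ∧
      (∀ v, stop = some v → -2147483648 ≤ v ∧ v ≤ 2147483648) := by
    unfold Dom_my_range3 pvDomInt at hdom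
    cases stop with
    | none => simp at hdom; exact ⟨hdom.1.1, hdom.1.2, hdom.2.1, hdom.2.2, by intro v h; cases h⟩
    | some v =>
      simp at hdom
      exact ⟨hdom.1.1.1, hdom.1.1.2, hdom.2.1, hdom.2.2, by
        intro w h; cases h; exact ⟨hdom.1.2.1, hdom.1.2.2⟩⟩
  cases stop with
  | none =>
    simp only
    -- remapped pair is (0, start)
    unfold Pre_my_range3 at hpre
    simp only at hpre
    rcases hpre with h | ⟨h1, h2⟩ | ⟨h1, h2⟩
    · -- start = 0
      rw [pvLoopA_stop _ _ _ _ _ (by simp [← h])]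
      simp [← h]
      by_cases hs : step < 0
      · rw [if_pos ⟨by omega, by omega⟩]
        have h2 := PySem.Int.floordiv_neg_neg 0 (-step)
        simp only [neg_zero, neg_neg] at h2
        rw [h2, PySem.Int.floordiv_eq_ediv_of_pos (show (0:ℤ) < -step by omega)]
        simp [PySem.List.pyRange_one_eq_nil]
      · rw [if_neg (by omega)]
        simp [PySem.List.pyRange_one_eq_nil]
    · -- 0 < start, step > 0
      rw [show (decide ((0:Int) > start)) = false by simp; omega]
      rw [pvLoopA_lt start step h2 8589934592 0 (by omega)]
      rw [if_pos ⟨by omega, by simp [h1, h2]⟩]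
      simp
    · -- start < 0, step < 0
      rw [show (decide ((0:Int) > start)) = true by simp; omega]
      rw [pvLoopA_gt_neg start step 8589934592 0]
      rw [pvLoopA_lt (-start) (-step) (by omega) 8589934592 (-0) (by omega)]
      rw [if_pos ⟨by omega, by simp; omega⟩]
      have hd : PySem.Int.floordiv (-0 - -start) (-step) = PySem.Int.floordiv (-(start - 0)) step := by
        rw [show (-0 - -start : Int) = -(-(start - 0)) from by ring]
        exact PySem.Int.floordiv_neg_neg _ _
      rw [hd]
      simp only [List.map_map]
      apply List.map_congr_left
      intro k _
      simp only [Function.comp_apply]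
      ring
  | some v =>
    simp only
    unfold Pre_my_range3 at hpre
    simp only at hpre
    rcases hpre with h | ⟨h1, h2⟩ | ⟨h1, h2⟩
    · rw [pvLoopA_stop _ _ _ _ _ (by simp [h])]
      simp [h]
      by_cases hs : step < 0
      · rw [if_pos ⟨by omega, by omega⟩]
        have h2 := PySem.Int.floordiv_neg_neg 0 (-step)
        simp only [neg_zero, neg_neg] at h2
        rw [h2, PySem.Int.floordiv_eq_ediv_of_pos (show (0:ℤ) < -step by omega)]
        simp [PySem.List.pyRange_one_eq_nil]
      · rw [if_neg (by omega)]
        simp [PySem.List.pyRange_one_eq_nil]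
    · have hv := (hb.2.2.2.2 v rfl)
      rw [show (decide (start > v)) = false by simp; omega]
      rw [pvLoopA_lt v step h2 8589934592 start (by omega)]
      rw [if_pos ⟨by omega, by simp [h2]; omega⟩]
      simp
    · have hv := (hb.2.2.2.2 v rfl)
      rw [show (decide (start > v)) = true by simp; omega]
      rw [pvLoopA_gt_neg v step 8589934592 start]
      rw [pvLoopA_lt (-v) (-step) (by omega) 8589934592 (-start) (by omega)]
      rw [if_pos ⟨by omega, by simp; omega⟩]
      have hd : PySem.Int.floordiv (-start - -v) (-step) = PySem.Int.floordiv (-(v - start)) step := by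
        rw [show (-start - -v : Int) = -(-(v - start)) from by ring]
        exact PySem.Int.floordiv_neg_neg _ _
      rw [hd]
      simp only [List.map_map]
      apply List.map_congr_left
      intro k _
      simp only [Function.comp_apply]
      ring
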